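-- pv_equiv track=rewrite | github.com/Jailtonfonseca/sn_media | viralclipper-ai/backend/app/services/youtube_analyzer.py | _merge_peaks
-- ===== SOURCE A (Python) =====
-- from typing import List, Tuple, Any
--
-- def _merge_peaks(peaks: List[Tuple[int, int]], merge_distance_seconds: int) -> List[Tuple[int, int]]:
--     """Merges adjacent peaks that are closer than the specified distance."""
--     if not peaks:
--         return []
--
--     merged_peaks = []
--     current_peak = peaks[0]
--
--     for next_peak in peaks[1:]:
--         # If the gap between the end of the current peak and the start of the next is small enough
--         if next_peak[0] - current_peak[1] <= merge_distance_seconds: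
--             # Merge by extending the end time of the current peak
--             current_peak = (current_peak[0], next_peak[1])
--         else:
--             # The gap is too large, so finalize the current peak and start a new one
--             merged_peaks.append(current_peak)
--             current_peak = next_peak
--
--     merged_peaks.append(current_peak) # Add the last processed peak
--     return merged_peaks
-- ===== SOURCE B (Python) =====
-- from typing import List, Tuple
--
-- def _merge_peaks(peaks: List[Tuple[int, int]], merge_distance_seconds: int) -> List[Tuple[int, int]]:
--     """Right-to-left scan: build the merged list back-to-front, patching the
--     start of the most recently emitted group when this peak belongs to it."""
--     out = []
--     for i in range(len(peaks) - 1, -1, -1):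
--         start, end = peaks[i]
--         if out and peaks[i + 1][0] - end <= merge_distance_seconds:
--             # this peak is close enough to the peak on its right: it belongs to
--             # the group emitted last, whose start moves left to this peak's start
--             out[-1] = (start, out[-1][1])
--         else:
--             out.append((start, end))
--     out.reverse()
--     return out
-- ===== Notes on version B (the rewrite author's own statement) =====
-- stated objective: alternative
-- what changed: B traverses the peaks right-to-left with no current-peak accumulator, building the output back-to-front: each peak either starts a new group or patches the start of the most recently emitted group, with a final reverse; A scans left-to-right carrying a growing current tuple.
import Mathlib
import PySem

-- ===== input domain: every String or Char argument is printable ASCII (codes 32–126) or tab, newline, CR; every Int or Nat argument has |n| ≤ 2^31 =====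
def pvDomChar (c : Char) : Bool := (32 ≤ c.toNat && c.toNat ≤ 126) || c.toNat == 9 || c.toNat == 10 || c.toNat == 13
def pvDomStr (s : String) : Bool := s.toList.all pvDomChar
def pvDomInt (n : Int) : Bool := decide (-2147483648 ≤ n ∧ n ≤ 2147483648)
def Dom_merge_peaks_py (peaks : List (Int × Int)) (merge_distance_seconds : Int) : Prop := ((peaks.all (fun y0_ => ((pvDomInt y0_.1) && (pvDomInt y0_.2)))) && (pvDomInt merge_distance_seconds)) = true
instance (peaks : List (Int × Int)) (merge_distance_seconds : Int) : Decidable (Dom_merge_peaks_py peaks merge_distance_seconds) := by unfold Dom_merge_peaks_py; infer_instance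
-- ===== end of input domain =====

-- B scans the peaks right-to-left, building the merged list back-to-front (alternative decomposition, same cost); the return value is proved equal on all inputs.

-- ===== PORT A =====
-- A's for-loop: state (merged_peaks, current_peak), branches in source order
def mergeLoopA (d : Int) (merged : List (Int × Int)) (cur : Int × Int) :
    List (Int × Int) → List (Int × Int)
  | [] => merged ++ [cur]
  | np :: rest =>
      if np.1 - cur.2 ≤ d then mergeLoopA d merged (cur.1, np.2) rest
      else mergeLoopA d (merged ++ [cur]) np rest

def merge_peaks_py (peaks : List (Int × Int)) (merge_distance_seconds : Int) : List (Int × Int) :=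
  match peaks with
  | [] => []
  | p :: rest => mergeLoopA merge_distance_seconds [] p rest

-- ===== PORT B =====
-- B's backward index loop, as a recursion over the reversed peak list; `prev` is
-- peaks[i+1] (the peak handled in the previous iteration) — `out` is nonempty
-- exactly when `prev` is `some`, so Python's `if out and …` is matched on `prev`.
def loopB (d : Int) (out : List (Int × Int)) (prev : Option (Int × Int)) :
    List (Int × Int) → List (Int × Int)
  | [] => out.reverse
  | p :: rest =>
      match prev with
      | some q =>
          if q.1 - p.2 ≤ d then
            loopB d (out.dropLast ++ [(p.1, out.getLastI.2)]) (some p) rest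
          else
            loopB d (out ++ [(p.1, p.2)]) (some p) rest
      | none => loopB d (out ++ [(p.1, p.2)]) (some p) rest

def merge_peaks_py_alt (peaks : List (Int × Int)) (merge_distance_seconds : Int) : List (Int × Int) :=
  loopB merge_distance_seconds [] none peaks.reverse

-- ===== PRECONDITION & SPEC =====
def Spec_merge_peaks_py (peaks : List (Int × Int)) (merge_distance_seconds : Int) (out : List (Int × Int)) : Prop := out = merge_peaks_py_alt peaks merge_distance_seconds
instance (peaks : List (Int × Int)) (merge_distance_seconds : Int) (out : List (Int × Int)) : Decidable (Spec_merge_peaks_py peaks merge_distance_seconds out) := by unfold Spec_merge_peaks_py; infer_instance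

-- ===== CLAIM (what is proved, stated in full; the proofs are below) =====
def Claim_equal_merge_peaks_py : Prop := ∀ (peaks : List (Int × Int)) (merge_distance_seconds : Int), Dom_merge_peaks_py peaks merge_distance_seconds → Spec_merge_peaks_py peaks merge_distance_seconds (merge_peaks_py peaks merge_distance_seconds)

-- ===== LEMMAS AND PROOFS =====

-- proof-only characterization: merge the head into the merged tail
def specM (d : Int) : List (Int × Int) → List (Int × Int)
  | [] => []
  | [p] => [p]
  | p :: q :: rest =>
      let m := specM d (q :: rest)
      if q.1 - p.2 ≤ d then (p.1, m.headI.2) :: m.tail else p :: m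

theorem specM_ne_nil (d : Int) (l : List (Int × Int)) (h : l ≠ []) : specM d l ≠ [] := by
  match l with
  | [p] => simp [specM]
  | p :: q :: rest =>
      simp only [specM]
      split <;> simp

-- the start of the head does not influence the shape of the merged tail
theorem specM_head (d : Int) (x y e : Int) (rs : List (Int × Int)) :
    specM d ((x, e) :: rs) =
      (x, (specM d ((y, e) :: rs)).headI.2) :: (specM d ((y, e) :: rs)).tail := by
  match rs with
  | [] => simp [specM]
  | q :: rs' =>
      simp only [specM]
      split <;> simp

theorem loopA_specM (d : Int) (rest : List (Int × Int)) :
    ∀ (merged : List (Int × Int)) (s e : Int),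
      mergeLoopA d merged (s, e) rest = merged ++ specM d ((s, e) :: rest) := by
  induction rest with
  | nil => intro merged s e; simp [mergeLoopA, specM]
  | cons np rs ih =>
      intro merged s e
      simp only [mergeLoopA, specM]
      by_cases h : np.1 - e ≤ d
      · rw [if_pos h, if_pos h, ih merged s np.2]
        rw [specM_head d s np.1 np.2 rs]
      · rw [if_neg h, if_neg h]
        have := ih (merged ++ [(s, e)]) np.1 np.2
        simpa using this

theorem loopB_inv (d : Int) (l : List (Int × Int)) :
    ∀ (S : List (Int × Int)), S ≠ [] →
      loopB d ((specM d S).reverse) (some S.headI) l = specM d (l.reverse ++ S) := by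
  induction l with
  | nil => intro S _; simp [loopB]
  | cons p rest ih =>
      intro S hS
      match S with
      | q :: S'' =>
        simp only [loopB, List.headI]
        by_cases h : q.1 - p.2 ≤ d
        · rw [if_pos h]
          have hM : specM d (q :: S'') ≠ [] := specM_ne_nil d _ (by simp)
          have hgl : ((specM d (q :: S'')).reverse).getLastI = (specM d (q :: S'')).headI := by
            rw [List.getLastI_eq_getLast?_getD, List.getLast?_reverse]
            cases hM' : specM d (q :: S'') with
            | nil => exact absurd hM' hM
            | cons a t => simp
          have hdl : ((specM d (q :: S'')).reverse).dropLast = (specM d (q :: S'')).tail.reverse := by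
            cases hM' : specM d (q :: S'') with
            | nil => exact absurd hM' hM
            | cons a t => simp
          rw [hgl, hdl]
          have hout : (specM d (q :: S'')).tail.reverse ++ [(p.1, (specM d (q :: S'')).headI.2)]
              = (specM d (p :: q :: S'')).reverse := by
            simp only [specM, if_pos h]
            simp
          rw [hout]
          have := ih (p :: q :: S'') (by simp)
          simp only [List.headI] at this
          rw [this]
          simp
        · rw [if_neg h]
          have hout : (specM d (q :: S'')).reverse ++ [(p.1, p.2)]
              = (specM d (p :: q :: S'')).reverse := by
            simp only [specM, if_neg h]
            simp
          rw [hout]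
          have := ih (p :: q :: S'') (by simp)
          simp only [List.headI] at this
          rw [this]
          simp

-- ===== VERDICT (by name: the statement is the Claim_ definition above) =====
theorem merge_peaks_py_spec : Claim_equal_merge_peaks_py := by
  intro peaks d _
  unfold Spec_merge_peaks_py merge_peaks_py merge_peaks_py_alt
  cases hp : peaks with
  | nil => simp [loopB]
  | cons p rest =>
      show mergeLoopA d [] p rest = loopB d [] none (p :: rest).reverse
      conv_lhs => rw [← Prod.mk.eta (p := p)]
      rw [loopA_specM d rest [] p.1 p.2]
      cases hr : (p :: rest).reverse with
      | nil => simp at hr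
      | cons p' l' =>
          have hpk : p :: rest = l'.reverse ++ [p'] := by
            have := congrArg List.reverse hr
            simpa using this
          simp only [loopB, List.nil_append]
          have h1 : [(p'.1, p'.2)] = (specM d [p']).reverse := by simp [specM]
          rw [h1]
          have h2 := loopB_inv d l' [p'] (by simp)
          simp only [List.headI] at h2
          rw [h2, ← hpk]
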